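-- pv_equiv track=rewrite | github.com/sandraschi/virtualization-mcp | src/virtualization_mcp/vbox_compat.py | _parse_vm_list
-- ===== SOURCE A (Python) =====
-- from typing import Dict, List, Optional, Union, Any
--
-- def _parse_vm_list(output: str, verbose: bool = False) -> List[Dict[str, Any]]:
--     """Parse the output of 'VBoxManage list vms'."""
--     vms = []
--     current_vm = {}
--
--     for line in output.splitlines():
--         line = line.strip()
--         if not line:
--             continue
--
--         if line.startswith('"'):
--             # New VM entry
--             if current_vm:
--                 vms.append(current_vm)
--
--             # Parse VM name and UUID
--             name, uuid = line.split(' ', 1)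
--             name = name.strip('"')
--             uuid = uuid.strip('{}')
--
--             current_vm = {
--                 'name': name,
--                 'uuid': uuid,
--                 'state': 'unknown'
--             }
--         elif verbose and ':' in line:
--             # Parse VM property
--             key, value = line.split(':', 1)
--             key = key.strip().lower().replace(' ', '_')
--             current_vm[key] = value.strip()
--
--     # Add the last VM
--     if current_vm:
--         vms.append(current_vm)
--
--     return vms
-- ===== SOURCE B (Python) =====
-- def _parse_vm_list(output, verbose=False):
--     """Parse the output of 'VBoxManage list vms' (block-wise two-pass)."""
--     lines = [s for s in (raw.strip() for raw in output.splitlines()) if s]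
--
--     # Pass 1: group lines into blocks, a new block at each '"'-header line.
--     blocks = []
--     current = []
--     for line in lines:
--         if line.startswith('"'):
--             blocks.append(current)
--             current = [line]
--         else:
--             current.append(line)
--     blocks.append(current)
--
--     # Pass 2: each block becomes one dict; empty dicts are dropped.
--     vms = []
--     for block in blocks:
--         vm = {}
--         rest = block
--         if block and block[0].startswith('"'):
--             name, uuid = block[0].split(' ', 1)
--             vm = {'name': name.strip('"'), 'uuid': uuid.strip('{}'),
--                   'state': 'unknown'}
--             rest = block[1:]
--         for line in rest:
--             if verbose and ':' in line:
--                 key, value = line.split(':', 1)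
--                 vm[key.strip().lower().replace(' ', '_')] = value.strip()
--         if vm:
--             vms.append(vm)
--     return vms
-- ===== Notes on version B (the rewrite author's own statement) =====
-- stated objective: alternative
-- what changed: A's single stateful loop with a mutable current_vm dict is replaced by a two-pass decomposition: first group the stripped non-empty lines into header-delimited blocks, then map each block independently to a dict and keep the non-empty ones.
import Mathlib
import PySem

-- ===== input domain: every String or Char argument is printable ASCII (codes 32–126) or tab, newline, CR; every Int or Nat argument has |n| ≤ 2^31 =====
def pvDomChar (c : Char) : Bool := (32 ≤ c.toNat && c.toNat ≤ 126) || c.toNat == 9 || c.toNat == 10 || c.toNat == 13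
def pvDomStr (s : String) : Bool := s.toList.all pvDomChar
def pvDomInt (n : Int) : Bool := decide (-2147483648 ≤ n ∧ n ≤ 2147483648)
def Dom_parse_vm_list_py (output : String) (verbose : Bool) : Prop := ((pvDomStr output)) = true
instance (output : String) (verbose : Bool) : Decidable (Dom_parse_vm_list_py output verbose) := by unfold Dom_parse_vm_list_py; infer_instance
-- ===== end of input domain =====

-- B parses in two passes (group lines into header-delimited blocks, then map each block to a dict)
-- instead of A's single stateful loop; objective: alternative decomposition, same cost.


-- ===== PORT A =====
-- name, uuid = line.split(' ', 1); current_vm = {'name': …, 'uuid': …, 'state': 'unknown'}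
-- (the `_` arm is Python's ValueError on a spaceless header line; Pre_ excludes those inputs)
def pvAHeader (l : String) : PySem.Dict String String :=
  match PySem.Str.splitMax? l " " 1 with
  | some [n, u] =>
      PySem.Dict.ofList [("name", PySem.Str.stripChars n "\""),
                         ("uuid", PySem.Str.stripChars u "{}"),
                         ("state", "unknown")]
  | _ => PySem.Dict.empty

-- key, value = line.split(':', 1); current_vm[key.strip().lower().replace(' ', '_')] = value.strip()
def pvAProp (d : PySem.Dict String String) (l : String) : PySem.Dict String String :=
  match PySem.Str.splitMax? l ":" 1 with
  | some [k, v] =>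
      d.insert (PySem.Str.replace (PySem.Str.lower (PySem.Str.strip k)) " " "_") (PySem.Str.strip v)
  | _ => d

-- loop body on an already-stripped, non-empty line
def pvACore (verbose : Bool) (s : List (PySem.Dict String String) × PySem.Dict String String)
    (l : String) : List (PySem.Dict String String) × PySem.Dict String String :=
  if PySem.Str.startswith l "\"" then
    ((if s.2.items.isEmpty then s.1 else s.1 ++ [s.2]), pvAHeader l)
  else if verbose && PySem.Str.isIn ":" l then
    (s.1, pvAProp s.2 l)
  else s

-- full loop body: line = line.strip(); if not line: continue; …
def pvAStep (verbose : Bool) (s : List (PySem.Dict String String) × PySem.Dict String String)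
    (raw : String) : List (PySem.Dict String String) × PySem.Dict String String :=
  let l := PySem.Str.strip raw
  if l == "" then s else pvACore verbose s l

def parse_vm_list_py (output : String) (verbose : Bool) : List (List (String × String)) :=
  let r := (PySem.Str.splitlines output).foldl (pvAStep verbose) ([], PySem.Dict.empty)
  (if r.2.items.isEmpty then r.1 else r.1 ++ [r.2]).map (·.items)

-- ===== PORT B =====
def pvBHeader (l : String) : PySem.Dict String String :=
  match PySem.Str.splitMax? l " " 1 with
  | some [n, u] =>
      PySem.Dict.ofList [("name", PySem.Str.stripChars n "\""),
                         ("uuid", PySem.Str.stripChars u "{}"),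
                         ("state", "unknown")]
  | _ => PySem.Dict.empty

def pvBInsert (d : PySem.Dict String String) (l : String) : PySem.Dict String String :=
  match PySem.Str.splitMax? l ":" 1 with
  | some [k, v] =>
      d.insert (PySem.Str.replace (PySem.Str.lower (PySem.Str.strip k)) " " "_") (PySem.Str.strip v)
  | _ => d

-- for line in rest: if verbose and ':' in line: …
def pvBProp (verbose : Bool) (d : PySem.Dict String String) (l : String) : PySem.Dict String String :=
  if verbose && PySem.Str.isIn ":" l then pvBInsert d l else d

-- one block → one dict
def pvBBlock (verbose : Bool) (b : List String) : PySem.Dict String String :=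
  let p : PySem.Dict String String × List String :=
    match b with
    | l :: rest => if PySem.Str.startswith l "\"" then (pvBHeader l, rest) else (PySem.Dict.empty, b)
    | [] => (PySem.Dict.empty, b)
  p.2.foldl (pvBProp verbose) p.1

def parse_vm_list_py_alt (output : String) (verbose : Bool) : List (List (String × String)) :=
  let lines := ((PySem.Str.splitlines output).map PySem.Str.strip).filter (fun s => s != "")
  let p := lines.foldl
    (fun (s : List (List String) × List String) l =>
      if PySem.Str.startswith l "\"" then (s.1 ++ [s.2], [l]) else (s.1, s.2 ++ [l]))
    ([], [])
  let blocks := p.1 ++ [p.2]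
  (blocks.foldl
    (fun acc b =>
      let vm := pvBBlock verbose b
      if vm.items.isEmpty then acc else acc ++ [vm]) []).map (·.items)

-- ===== PRECONDITION & SPEC =====
-- Pre_ excludes exactly the inputs where a stripped line starts with '"' but contains no space:
-- there `name, uuid = line.split(' ', 1)` raises ValueError in A (B raises too).
def Pre_parse_vm_list_py (output : String) (verbose : Bool) : Prop :=
  ∀ l ∈ PySem.Str.splitlines output,
    PySem.Str.startswith (PySem.Str.strip l) "\"" = true →
      PySem.Str.isIn " " (PySem.Str.strip l) = true
instance (output : String) (verbose : Bool) : Decidable (Pre_parse_vm_list_py output verbose) := by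
  unfold Pre_parse_vm_list_py; infer_instance

def pvWitness_parse_vm_list_py : String × Bool := ("\"vm one\" {1234-ab}\nMemory size: 512\n\nName: x", true)

def Spec_parse_vm_list_py (output : String) (verbose : Bool) (out : List (List (String × String))) : Prop := out = parse_vm_list_py_alt output verbose
instance (output : String) (verbose : Bool) (out : List (List (String × String))) : Decidable (Spec_parse_vm_list_py output verbose out) := by unfold Spec_parse_vm_list_py; infer_instance

-- ===== CLAIM (what is proved, stated in full; the proofs are below) =====
def Claim_equal_parse_vm_list_py : Prop := ∀ (output : String) (verbose : Bool), Dom_parse_vm_list_py output verbose → Pre_parse_vm_list_py output verbose → Spec_parse_vm_list_py output verbose (parse_vm_list_py output verbose)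

-- ===== LEMMAS AND PROOFS =====

theorem pvBHeader_eq : pvBHeader = pvAHeader := rfl
theorem pvBInsert_eq : pvBInsert = pvAProp := rfl

-- the common recursive description both ports are reduced to
def pvEmitRec (verbose : Bool) (d : PySem.Dict String String) :
    List String → List (PySem.Dict String String)
  | [] => if d.items.isEmpty then [] else [d]
  | l :: ls =>
    if PySem.Str.startswith l "\"" then
      (if d.items.isEmpty then [] else [d]) ++ pvEmitRec verbose (pvAHeader l) ls
    else if verbose && PySem.Str.isIn ":" l then
      pvEmitRec verbose (pvAProp d l) ls
    else pvEmitRec verbose d ls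

-- A's loop over raw lines is the core loop over stripped non-empty lines
theorem pvA_fold_clean (verbose : Bool) (ls : List String)
    (s : List (PySem.Dict String String) × PySem.Dict String String) :
    ls.foldl (pvAStep verbose) s
      = ((ls.map PySem.Str.strip).filter (fun x => x != "")).foldl (pvACore verbose) s := by
  induction ls generalizing s with
  | nil => rfl
  | cons l ls ih =>
    simp only [List.foldl_cons, List.map_cons, List.filter_cons, pvAStep]
    by_cases h : PySem.Str.strip l = ""
    · simp [h, ih]
    · simp [h, ih]

-- A's core loop + final flush = pvEmitRec
theorem pvA_emit (verbose : Bool) (ls : List String)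
    (vms : List (PySem.Dict String String)) (d : PySem.Dict String String) :
    (if (ls.foldl (pvACore verbose) (vms, d)).2.items.isEmpty then
        (ls.foldl (pvACore verbose) (vms, d)).1
      else (ls.foldl (pvACore verbose) (vms, d)).1 ++ [(ls.foldl (pvACore verbose) (vms, d)).2])
      = vms ++ pvEmitRec verbose d ls := by
  induction ls generalizing vms d with
  | nil =>
    simp only [List.foldl_nil, pvEmitRec]
    by_cases h : d.items.isEmpty <;> simp [h]
  | cons l ls ih =>
    simp only [List.foldl_cons, pvEmitRec]
    by_cases hq : PySem.Str.startswith l "\"" = true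
    · have hq2 : PySem.Chars.startswith l.toList ['\"'] = true := by simpa using hq
      have hs : pvACore verbose (vms, d) l
          = ((if d.items.isEmpty then vms else vms ++ [d]), pvAHeader l) := by
        simp [pvACore, hq2]
      rw [hs, ih]
      by_cases h : d.items.isEmpty <;> simp [hq2, h]
    · have hq2 : PySem.Chars.startswith l.toList ['\"'] = false := by
        simpa using hq
      by_cases hv : (verbose && PySem.Str.isIn ":" l) = true
      · have hv2 : verbose = true ∧ PySem.Chars.isIn [':'] l.toList = true := by
          simpa using hv
        have hs : pvACore verbose (vms, d) l = (vms, pvAProp d l) := by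
          simp [pvACore, hq2, hv2]
        rw [hs, ih]
        simp [hq2, hv2]
      · have hv2 : ¬ (verbose = true ∧ PySem.Chars.isIn [':'] l.toList = true) := by
          simpa using hv
        have hs : pvACore verbose (vms, d) l = (vms, d) := by
          simp [pvACore, hq2, hv2]
        rw [hs, ih]
        simp [hq2, hv2]

-- B's grouping fold as a recursion
def pvBlocksRec (cur : List String) : List String → List (List String)
  | [] => [cur]
  | l :: ls =>
    if PySem.Str.startswith l "\"" then cur :: pvBlocksRec [l] ls
    else pvBlocksRec (cur ++ [l]) ls

theorem pvB_blocks (ls : List String) (done : List (List String)) (cur : List String) :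
    (ls.foldl
        (fun (s : List (List String) × List String) l =>
          if PySem.Str.startswith l "\"" then (s.1 ++ [s.2], [l]) else (s.1, s.2 ++ [l]))
        (done, cur)).1
      ++ [(ls.foldl
        (fun (s : List (List String) × List String) l =>
          if PySem.Str.startswith l "\"" then (s.1 ++ [s.2], [l]) else (s.1, s.2 ++ [l]))
        (done, cur)).2]
      = done ++ pvBlocksRec cur ls := by
  induction ls generalizing done cur with
  | nil => simp [pvBlocksRec]
  | cons l ls ih =>
    simp only [List.foldl_cons, pvBlocksRec]
    by_cases hq : PySem.Str.startswith l "\"" = true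
    · simp only [hq, if_pos, ih]
      simp
    · have hq' : PySem.Str.startswith l "\"" = false := by simpa using hq
      simp only [hq', Bool.false_eq_true, if_false]
      exact ih _ _

def pvEmitB (d : PySem.Dict String String) : List (PySem.Dict String String) :=
  if d.items.isEmpty then [] else [d]

-- B's emit loop as a flatMap
theorem pvB_emit_fold (verbose : Bool) (bs : List (List String))
    (acc : List (PySem.Dict String String)) :
    bs.foldl
      (fun acc b =>
        if (pvBBlock verbose b).items.isEmpty then acc else acc ++ [pvBBlock verbose b]) acc
      = acc ++ bs.flatMap (fun b => pvEmitB (pvBBlock verbose b)) := by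
  induction bs generalizing acc with
  | nil => simp
  | cons b bs ih =>
    simp only [List.foldl_cons, List.flatMap_cons, pvEmitB]
    by_cases h : (pvBBlock verbose b).items.isEmpty = true
    · rw [if_pos h, if_pos h, ih]
      simp [pvEmitB]
    · rw [if_neg h, if_neg h, ih]
      simp [pvEmitB]
-- appending a non-header line to a block just applies the property step
theorem pvBBlock_append (verbose : Bool) (cur : List String) (l : String)
    (h : PySem.Str.startswith l "\"" = false) :
    pvBBlock verbose (cur ++ [l]) = pvBProp verbose (pvBBlock verbose cur) l := by
  have h' : PySem.Chars.startswith l.toList ['\"'] = false := by simpa using h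
  cases cur with
  | nil => simp [pvBBlock, h']
  | cons c rest =>
    by_cases hc : PySem.Chars.startswith c.toList ['\"'] = true
    · simp [pvBBlock, hc, List.foldl_append]
    · have hc' : PySem.Chars.startswith c.toList ['\"'] = false := by simpa using hc
      simp [pvBBlock, hc', List.foldl_append]

-- B's second pass over the blocks of ls equals pvEmitRec from the current block's dict
theorem pvB_emitRec (verbose : Bool) (ls : List String) (cur : List String) :
    (pvBlocksRec cur ls).flatMap (fun b => pvEmitB (pvBBlock verbose b))
      = pvEmitRec verbose (pvBBlock verbose cur) ls := by
  induction ls generalizing cur with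
  | nil => simp [pvBlocksRec, pvEmitRec, pvEmitB]
  | cons l ls ih =>
    simp only [pvBlocksRec, pvEmitRec]
    by_cases hq : PySem.Str.startswith l "\"" = true
    · have hq2 : PySem.Chars.startswith l.toList ['\"'] = true := by simpa using hq
      simp only [hq, if_pos, List.flatMap_cons]
      rw [ih]
      have hb : pvBBlock verbose [l] = pvAHeader l := by
        simp [pvBBlock, hq2, pvBHeader_eq]
      rw [hb]
      rfl
    · have hq' : PySem.Str.startswith l "\"" = false := by simpa using hq
      simp only [hq', Bool.false_eq_true, if_false]
      rw [ih, pvBBlock_append verbose cur l hq']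
      by_cases hv : verbose = true ∧ PySem.Chars.isIn [':'] l.toList = true
      · simp [pvBProp, hv, pvBInsert_eq]
      · simp [pvBProp, hv]

-- ===== VERDICT (by name: the statement is the Claim_ definition above) =====
theorem parse_vm_list_py_spec : Claim_equal_parse_vm_list_py := by
  intro output verbose _ _
  show parse_vm_list_py output verbose = parse_vm_list_py_alt output verbose
  simp only [parse_vm_list_py, parse_vm_list_py_alt]
  rw [pvA_fold_clean]
  rw [pvA_emit verbose _ [] PySem.Dict.empty]
  rw [pvB_blocks _ [] []]
  rw [pvB_emit_fold]
  simp only [List.nil_append]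
  rw [pvB_emitRec]
  have hnil : pvBBlock verbose ([] : List String) = PySem.Dict.empty := rfl
  rw [hnil]
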